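-- pv_equiv track=rewrite | github.com/hugofolloni/stockglass | game.py | diagonal_moves
-- ===== SOURCE A (Python) =====
-- def diagonal_moves(start):
--     right_up_moves = []
--     left_up_moves = []
--     right_down_moves = []
--     left_down_moves = []
--     size = 8
--     start_copy = start
--     while(start_copy[0] > 0 and start_copy[1] > 0):
--         start_copy = (start_copy[0] - 1, start_copy[1] - 1)
--         right_down_moves.append(start_copy)
--     start_copy = start
--     while(start_copy[0] > 0 and start_copy[1] < size - 1):
--         start_copy = (start_copy[0] - 1, start_copy[1] + 1)
--         left_down_moves.append(start_copy)
--     start_copy = start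
--     while(start_copy[0] < size - 1 and start_copy[1] > 0):
--         start_copy = (start_copy[0] + 1, start_copy[1] - 1)
--         right_up_moves.append(start_copy)
--     start_copy = start
--     while(start_copy[0] < size - 1 and start_copy[1] < size - 1):
--         start_copy = (start_copy[0] + 1, start_copy[1] + 1)
--         left_up_moves.append(start_copy)
--     return [right_up_moves, left_up_moves, right_down_moves, left_down_moves]
-- ===== SOURCE B (Python) =====
-- def diagonal_moves(start):
--     r, c = start
--     def ray(dr, dc, n):
--         return [(r + dr * i, c + dc * i) for i in range(1, max(0, n) + 1)]
--     return [ray(1, -1, min(7 - r, c)),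
--             ray(1, 1, min(7 - r, 7 - c)),
--             ray(-1, -1, min(r, c)),
--             ray(-1, 1, min(r, 7 - c))]
-- ===== Notes on version B (the rewrite author's own statement) =====
-- stated objective: simpler
-- what changed: Replaces the four boundary-discovering while loops by a closed-form step count n = max(0, min(distance-to-row-bound, distance-to-col-bound)) per diagonal, then generates each ray with a single comprehension over range(1, n+1).
import Mathlib
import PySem

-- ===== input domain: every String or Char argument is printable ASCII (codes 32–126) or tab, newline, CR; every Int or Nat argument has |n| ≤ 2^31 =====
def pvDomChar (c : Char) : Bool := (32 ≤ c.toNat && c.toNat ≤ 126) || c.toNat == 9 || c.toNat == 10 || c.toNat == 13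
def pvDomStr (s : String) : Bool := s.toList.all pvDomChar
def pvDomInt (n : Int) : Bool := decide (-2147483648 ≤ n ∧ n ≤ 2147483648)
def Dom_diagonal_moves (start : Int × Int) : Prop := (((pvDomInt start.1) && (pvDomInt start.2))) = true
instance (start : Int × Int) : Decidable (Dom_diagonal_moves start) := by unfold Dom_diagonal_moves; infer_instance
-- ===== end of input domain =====

-- B replaces A's four boundary-discovering while loops by closed-form ray lengths
-- (min of the distances to the two bounds) plus a generated range pass; objective: simpler.

-- ===== PORT A =====
-- while(x > 0 and y > 0): step (-1,-1), append
def pvLoopRD (x y : Int) (acc : List (Int × Int)) : List (Int × Int) :=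
  if x > 0 ∧ y > 0 then pvLoopRD (x - 1) (y - 1) (acc ++ [(x - 1, y - 1)]) else acc
termination_by x.toNat
decreasing_by omega

-- while(x > 0 and y < 7): step (-1,+1), append
def pvLoopLD (x y : Int) (acc : List (Int × Int)) : List (Int × Int) :=
  if x > 0 ∧ y < 7 then pvLoopLD (x - 1) (y + 1) (acc ++ [(x - 1, y + 1)]) else acc
termination_by x.toNat
decreasing_by omega

-- while(x < 7 and y > 0): step (+1,-1), append
def pvLoopRU (x y : Int) (acc : List (Int × Int)) : List (Int × Int) :=
  if x < 7 ∧ y > 0 then pvLoopRU (x + 1) (y - 1) (acc ++ [(x + 1, y - 1)]) else acc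
termination_by y.toNat
decreasing_by omega

-- while(x < 7 and y < 7): step (+1,+1), append
def pvLoopLU (x y : Int) (acc : List (Int × Int)) : List (Int × Int) :=
  if x < 7 ∧ y < 7 then pvLoopLU (x + 1) (y + 1) (acc ++ [(x + 1, y + 1)]) else acc
termination_by (7 - x).toNat
decreasing_by omega

def diagonal_moves (start : Int × Int) : List (List (Int × Int)) :=
  let right_down_moves := pvLoopRD start.1 start.2 []
  let left_down_moves := pvLoopLD start.1 start.2 []
  let right_up_moves := pvLoopRU start.1 start.2 []
  let left_up_moves := pvLoopLU start.1 start.2 []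
  [right_up_moves, left_up_moves, right_down_moves, left_down_moves]

-- ===== PORT B =====
-- [(r + dr*i, c + dc*i) for i in range(1, max(0, n) + 1)]
def pvRay (r c dr dc n : Int) : List (Int × Int) :=
  (PySem.List.pyRange 1 (max 0 n + 1) 1).map (fun i => (r + dr * i, c + dc * i))

def diagonal_moves_alt (start : Int × Int) : List (List (Int × Int)) :=
  let r := start.1
  let c := start.2
  [pvRay r c 1 (-1) (min (7 - r) c),
   pvRay r c 1 1 (min (7 - r) (7 - c)),
   pvRay r c (-1) (-1) (min r c),
   pvRay r c (-1) 1 (min r (7 - c))]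

-- ===== PRECONDITION & SPEC =====
def Spec_diagonal_moves (start : Int × Int) (out : List (List (Int × Int))) : Prop := out = diagonal_moves_alt start
instance (start : Int × Int) (out : List (List (Int × Int))) : Decidable (Spec_diagonal_moves start out) := by unfold Spec_diagonal_moves; infer_instance

-- ===== CLAIM (what is proved, stated in full; the proofs are below) =====
def Claim_equal_diagonal_moves : Prop := ∀ (start : Int × Int), Dom_diagonal_moves start → Spec_diagonal_moves start (diagonal_moves start)

-- ===== LEMMAS AND PROOFS =====

lemma pvRay_eq (r c dr dc n : Int) :
    pvRay r c dr dc n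
      = (List.range n.toNat).map (fun (k : ℕ) => (r + dr * (1 + (k : Int)), c + dc * (1 + (k : Int)))) := by
  unfold pvRay
  rw [PySem.List.pyRange_one]
  have h : (max 0 n + 1 - 1).toNat = n.toNat := by omega
  rw [h, List.map_map]
  apply List.map_congr_left
  intro k _
  simp [Function.comp]

lemma pvLoopRD_eq (n : ℕ) : ∀ (x y : Int) (acc : List (Int × Int)), (min x y).toNat = n →
    pvLoopRD x y acc = acc ++ (List.range n).map (fun (k : ℕ) => (x - (1 + (k : Int)), y - (1 + (k : Int)))) := by
  induction n with
  | zero =>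
    intro x y acc h
    rw [pvLoopRD, if_neg (by omega)]
    simp
  | succ n ih =>
    intro x y acc h
    rw [pvLoopRD, if_pos (by omega), ih (x - 1) (y - 1) _ (by omega)]
    rw [List.range_succ_eq_map, List.map_cons, List.map_map]
    simp only [List.append_assoc, List.singleton_append, Nat.cast_zero]
    congr 1
    congr 1
    norm_num
    intro a _
    constructor <;> ring

lemma pvLoopLD_eq (n : ℕ) : ∀ (x y : Int) (acc : List (Int × Int)), (min x (7 - y)).toNat = n →
    pvLoopLD x y acc = acc ++ (List.range n).map (fun (k : ℕ) => (x - (1 + (k : Int)), y + (1 + (k : Int)))) := by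
  induction n with
  | zero =>
    intro x y acc h
    rw [pvLoopLD, if_neg (by omega)]
    simp
  | succ n ih =>
    intro x y acc h
    rw [pvLoopLD, if_pos (by omega), ih (x - 1) (y + 1) _ (by omega)]
    rw [List.range_succ_eq_map, List.map_cons, List.map_map]
    simp only [List.append_assoc, List.singleton_append, Nat.cast_zero]
    congr 1
    congr 1
    norm_num
    intro a _
    constructor <;> ring

lemma pvLoopRU_eq (n : ℕ) : ∀ (x y : Int) (acc : List (Int × Int)), (min (7 - x) y).toNat = n →
    pvLoopRU x y acc = acc ++ (List.range n).map (fun (k : ℕ) => (x + (1 + (k : Int)), y - (1 + (k : Int)))) := by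
  induction n with
  | zero =>
    intro x y acc h
    rw [pvLoopRU, if_neg (by omega)]
    simp
  | succ n ih =>
    intro x y acc h
    rw [pvLoopRU, if_pos (by omega), ih (x + 1) (y - 1) _ (by omega)]
    rw [List.range_succ_eq_map, List.map_cons, List.map_map]
    simp only [List.append_assoc, List.singleton_append, Nat.cast_zero]
    congr 1
    congr 1
    norm_num
    intro a _
    constructor <;> ring

lemma pvLoopLU_eq (n : ℕ) : ∀ (x y : Int) (acc : List (Int × Int)), (min (7 - x) (7 - y)).toNat = n →
    pvLoopLU x y acc = acc ++ (List.range n).map (fun (k : ℕ) => (x + (1 + (k : Int)), y + (1 + (k : Int)))) := by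
  induction n with
  | zero =>
    intro x y acc h
    rw [pvLoopLU, if_neg (by omega)]
    simp
  | succ n ih =>
    intro x y acc h
    rw [pvLoopLU, if_pos (by omega), ih (x + 1) (y + 1) _ (by omega)]
    rw [List.range_succ_eq_map, List.map_cons, List.map_map]
    simp only [List.append_assoc, List.singleton_append, Nat.cast_zero]
    congr 1
    congr 1
    norm_num
    intro a _
    constructor <;> ring

-- ===== VERDICT (by name: the statement is the Claim_ definition above) =====
theorem diagonal_moves_spec : Claim_equal_diagonal_moves := by
  intro start _
  unfold Spec_diagonal_moves diagonal_moves diagonal_moves_alt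
  obtain ⟨r, c⟩ := start
  simp only
  rw [pvLoopRD_eq (min r c).toNat r c [] rfl,
      pvLoopLD_eq (min r (7 - c)).toNat r c [] rfl,
      pvLoopRU_eq (min (7 - r) c).toNat r c [] rfl,
      pvLoopLU_eq (min (7 - r) (7 - c)).toNat r c [] rfl,
      pvRay_eq, pvRay_eq, pvRay_eq, pvRay_eq]
  simp only [List.nil_append]
  refine congrArg₂ _ ?_ (congrArg₂ _ ?_ (congrArg₂ _ ?_ (congrArg₂ _ ?_ rfl))) <;>
    · apply List.map_congr_left
      intro k _
      simp only [Prod.mk.injEq]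
      constructor <;> ring
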